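-- pv_equiv track=rewrite | github.com/axbryd/hXDP-Artifacts | parallelizer/ebpf_parser.py | modify_register
-- ===== SOURCE A (Python) =====
-- def little_to_big(instruct, size=8, signed=False):
--     return int.from_bytes(instruct.to_bytes(size, byteorder='little', signed=signed), byteorder='big', signed=signed)
--
-- def modify_register(instruct, register, shift):
--     register = little_to_big(register, size=1)
--
--     for i in range(4):
--         bit = ((register & (1 << i)) != 0)
--         if bit == 0:
--             instruct &= ~(1 << (i + shift))
--         else:
--             instruct |= (1 << (i + shift))
--     return instruct
-- ===== SOURCE B (Python) =====
-- def modify_register(instruct, register, shift):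
--     mask = 0xF << shift
--     return (instruct & ~mask) | ((register & 0xF) << shift)
-- ===== Notes on version B (the rewrite author's own statement) =====
-- stated objective: simpler
-- what changed: A copies the register's low 4 bits into the instruction one bit at a time in a range(4) loop (plus a byte-order round-trip on the register); B writes the whole nibble in one closed-form masked operation: (instruct & ~(0xF << shift)) | ((register & 0xF) << shift).
import Mathlib
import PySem

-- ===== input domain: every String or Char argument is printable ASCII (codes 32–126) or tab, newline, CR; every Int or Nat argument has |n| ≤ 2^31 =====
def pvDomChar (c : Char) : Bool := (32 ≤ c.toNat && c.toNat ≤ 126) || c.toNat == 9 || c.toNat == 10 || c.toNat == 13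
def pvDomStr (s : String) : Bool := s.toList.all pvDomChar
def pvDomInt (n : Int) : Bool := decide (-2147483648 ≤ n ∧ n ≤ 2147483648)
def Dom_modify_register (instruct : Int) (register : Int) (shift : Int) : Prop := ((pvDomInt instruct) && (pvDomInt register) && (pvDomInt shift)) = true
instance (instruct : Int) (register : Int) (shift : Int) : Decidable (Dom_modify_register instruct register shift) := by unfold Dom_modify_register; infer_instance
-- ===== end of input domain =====

-- B replaces A's 4-iteration bit-by-bit loop with a single closed-form masked nibble write (objective: simpler).


-- ===== PORT A =====
-- int.to_bytes(size, 'little'): little-endian byte list; exact for 0 ≤ n < 256^size (elsewhere Python raises OverflowError, excluded by Pre_)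
def pvToBytesLE (n : Int) (size : Nat) : List Int :=
  (List.range size).map (fun i => PySem.Int.mod (n >>> (8 * i)) 256)

-- int.from_bytes(bytes, 'big'): fold most-significant-first
def pvFromBytesBE (bytes : List Int) : Int :=
  bytes.foldl (fun acc b => acc * 256 + b) 0

def little_to_big (instruct : Int) (size : Nat) (signed : Bool) : Int :=
  pvFromBytesBE (pvToBytesLE instruct size)

def modify_register (instruct : Int) (register : Int) (shift : Int) : Int :=
  let register := little_to_big register 1 false
  (List.range 4).foldl (fun ins i =>
    let bit : Bool := decide (PySem.Int.band register (1 <<< i) ≠ 0)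
    if bit = false then PySem.Int.band ins (Int.not (1 <<< ((i : Int) + shift).toNat))
    else PySem.Int.bor ins (1 <<< ((i : Int) + shift).toNat)) instruct

-- ===== PORT B =====
def modify_register_alt (instruct : Int) (register : Int) (shift : Int) : Int :=
  let mask : Int := 15 <<< shift.toNat
  PySem.Int.bor (PySem.Int.band instruct (Int.not mask))
                (PySem.Int.band register 15 <<< shift.toNat)

-- ===== PRECONDITION & SPEC =====
-- Pre_ excludes exactly the inputs where A raises: register outside 0..255 (OverflowError from
-- register.to_bytes(1, 'little')) and negative shift (ValueError from '1 << negative').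
def Pre_modify_register (instruct : Int) (register : Int) (shift : Int) : Prop :=
  0 ≤ register ∧ register < 256 ∧ 0 ≤ shift
instance (instruct : Int) (register : Int) (shift : Int) : Decidable (Pre_modify_register instruct register shift) := by unfold Pre_modify_register; infer_instance

def pvWitness_modify_register : Int × Int × Int := (97, 7, 8)

def Spec_modify_register (instruct : Int) (register : Int) (shift : Int) (out : Int) : Prop := out = modify_register_alt instruct register shift
instance (instruct : Int) (register : Int) (shift : Int) (out : Int) : Decidable (Spec_modify_register instruct register shift out) := by unfold Spec_modify_register; infer_instance

-- ===== CLAIM (what is proved, stated in full; the proofs are below) =====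
def Claim_equal_modify_register : Prop := ∀ (instruct : Int) (register : Int) (shift : Int), Dom_modify_register instruct register shift → Pre_modify_register instruct register shift → Spec_modify_register instruct register shift (modify_register instruct register shift)


-- ===== LEMMAS AND PROOFS =====

-- a ||| b = a + b when a and b share no bits
theorem pv_or_eq_add (a : Nat) : ∀ b : Nat, a &&& b = 0 → a ||| b = a + b := by
  induction a using Nat.binaryRec with
  | zero => simp
  | bit a0 a' ih =>
    intro b h
    rw [← Nat.bit_testBit_zero_shiftRight_one b] at h ⊢
    rw [Nat.land_bit] at h
    rw [Nat.lor_bit]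
    rw [Nat.bit_eq_zero_iff] at h
    obtain ⟨h1, h2⟩ := h
    rw [ih _ h1]
    cases a0 <;> cases hb : b.testBit 0 <;> simp_all [Nat.bit_val] <;> omega

theorem pv_ldiff_eq_sub (a b : Nat) : Nat.ldiff a b = a - (a &&& b) := by
  have h1 : Nat.ldiff a b ||| (a &&& b) = a := by
    apply Nat.eq_of_testBit_eq
    intro i
    simp [Nat.testBit_ldiff]
    cases a.testBit i <;> cases b.testBit i <;> simp
  have h2 : Nat.ldiff a b &&& (a &&& b) = 0 := by
    apply Nat.eq_of_testBit_eq
    intro i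
    simp [Nat.testBit_ldiff]
    cases a.testBit i <;> cases b.testBit i <;> simp
  have h3 := pv_or_eq_add _ _ h2
  have h4 : a &&& b ≤ a := Nat.and_le_left
  omega

theorem pv_band_eq_land (a b : Int) : PySem.Int.band a b = Int.land a b := by
  rcases a with a | a <;> rcases b with b | b <;>
    simp [PySem.Int.band, Int.land, Int.negSucc_eq, pv_ldiff_eq_sub] <;> omega

theorem pv_bor_eq_lor (a b : Int) : PySem.Int.bor a b = Int.lor a b := by
  rcases a with a | a <;> rcases b with b | b <;>
    simp [PySem.Int.bor, Int.lor, Int.negSucc_eq, pv_ldiff_eq_sub] <;> omega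

theorem pv_not_eq_lnot (a : Int) : Int.not a = Int.lnot a := by
  rcases a with a | a <;> rfl

theorem pv_int_ext (m n : Int) (h : ∀ k, m.testBit k = n.testBit k) : m = n := by
  rcases m with m | m <;> rcases n with n | n
  · exact congrArg Int.ofNat (Nat.eq_of_testBit_eq h)
  · exfalso
    have h1 := h (max m n)
    have hm : m.testBit (max m n) = false :=
      Nat.testBit_eq_false_of_lt (lt_of_le_of_lt (le_max_left m n) (Nat.lt_two_pow_self))
    have hn : n.testBit (max m n) = false :=
      Nat.testBit_eq_false_of_lt (lt_of_le_of_lt (le_max_right m n) (Nat.lt_two_pow_self))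
    simp [Int.testBit, hm, hn] at h1
  · exfalso
    have h1 := h (max m n)
    have hm : m.testBit (max m n) = false :=
      Nat.testBit_eq_false_of_lt (lt_of_le_of_lt (le_max_left m n) (Nat.lt_two_pow_self))
    have hn : n.testBit (max m n) = false :=
      Nat.testBit_eq_false_of_lt (lt_of_le_of_lt (le_max_right m n) (Nat.lt_two_pow_self))
    simp [Int.testBit, hm, hn] at h1
  · exact congrArg Int.negSucc (Nat.eq_of_testBit_eq (fun i => by
      have := h i; simpa [Int.testBit] using this))

theorem pv_tb_coe (m : Nat) (k : Nat) : ((m : Int)).testBit k = m.testBit k := rfl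
theorem pv_land_coe (m n : Nat) : Int.land (m : Int) (n : Int) = ((m &&& n : Nat) : Int) := rfl
theorem pv_shl_coe (m c : Nat) : ((m : Int)) <<< c = ((m <<< c : Nat) : Int) := rfl
theorem pv_one_shl (c : Nat) : ((1:Int) <<< c) = ((1 <<< c : Nat) : Int) := rfl
theorem pv_tb_one (k : Nat) : Nat.testBit 1 k = decide (k = 0) := by
  rcases k with _ | k <;> simp [Nat.testBit_succ]

-- ===== VERDICT (by name: the statement is the Claim_ definition above) =====
theorem modify_register_spec : Claim_equal_modify_register := by
  intro instruct register shift _ hpre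
  obtain ⟨hr0, hr1, hs0⟩ := hpre
  unfold Spec_modify_register modify_register modify_register_alt little_to_big pvToBytesLE pvFromBytesBE
  -- register.to_bytes(1,'little') read back big-endian is register itself
  have hltb : ((List.range 1).map (fun i => PySem.Int.mod (register >>> (8 * i)) 256)).foldl
      (fun acc b => acc * 256 + b) 0 = register := by
    have hsr : register >>> ((0 : Int)) = register := by
      rw [show ((0:Int)) = ((0:Nat):Int) from rfl, Int.shiftRight_natCast_right]
      exact Int.shiftRight_zero register
    simp [hsr, PySem.Int.mod, Int.fmod_eq_emod]
    omega
  rw [hltb]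
  lift register to Nat using hr0 with rn
  have hts : ∀ i : Nat, (((i:Int)) + shift).toNat = i + shift.toNat := by intro i; omega
  have hband15 : PySem.Int.band (rn : Int) 15 = ((rn &&& 15 : Nat) : Int) := by
    rw [pv_band_eq_land]; exact pv_land_coe rn 15
  have hcond : ∀ i : Nat, (decide (PySem.Int.band (rn : Int) (1 <<< i) ≠ 0)) = rn.testBit i := by
    intro i
    rw [pv_band_eq_land]
    rw [show Int.land (rn : Int) ((1 <<< i : Nat) : Int) = ((rn &&& (1 <<< i) : Nat) : Int) from rfl]
    rw [Nat.shiftLeft_eq, one_mul, Nat.and_two_pow]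
    cases h : rn.testBit i <;> simp
  rw [show List.range 4 = [0, 1, 2, 3] from rfl]
  simp only [List.foldl_cons, List.foldl_nil, hcond, hts, hband15]
  generalize shift.toNat = s
  apply pv_int_ext
  intro k
  by_cases h0 : rn.testBit 0 <;> by_cases h1 : rn.testBit 1 <;> by_cases h2 : rn.testBit 2 <;> by_cases h3 : rn.testBit 3 <;>
    simp only [h0, h1, h2, h3, Bool.true_eq_false, Bool.not_eq_true, if_true, if_false,
      ite_true, ite_false, pv_band_eq_land, pv_bor_eq_lor, pv_not_eq_lnot, pv_one_shl, pv_shl_coe,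
      Int.testBit_land, Int.testBit_lor, Int.testBit_lnot, pv_tb_coe, Nat.testBit_shiftLeft, pv_tb_one,
      Nat.testBit_land, show (15:Nat) = 2 ^ 4 - 1 from rfl, Nat.testBit_two_pow_sub_one] <;>
  · rcases Nat.lt_or_ge k s with hk | hk
    · simp [show ¬ (s ≤ k) from by omega, show ¬ (1 + s ≤ k) from by omega,
        show ¬ (2 + s ≤ k) from by omega, show ¬ (3 + s ≤ k) from by omega]
    · obtain ⟨j, rfl⟩ : ∃ j, k = s + j := ⟨k - s, by omega⟩
      rcases j with _ | _ | _ | _ | j <;>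
        simp [h0, h1, h2, h3, show ∀ i:Nat, s ≤ s + i from by omega,
          show ∀ i j:Nat, ((j:Nat) + s ≤ s + i) ↔ (j ≤ i) from by omega,
          show ∀ i j:Nat, s + i - (j + s) = i - j from by omega,
          show ∀ jj:Nat, ¬ (jj+1+1+1+1 < 4) from by omega,
          Nat.add_sub_cancel_left]
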